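-- pv_equiv track=rewrite | github.com/erdemkepenek/Comp472Project | byomodel.py | uniGram
-- ===== SOURCE A (Python) =====
-- from collections import Counter
--
-- def checkWordObeyRules(word):
--     if word[0] != '#' and word[0] != '@' and "http" not in word.lower() and checkNot3Consecutive(word):
--         return True
--     else:
--         return False
--
-- def checkNot3Consecutive(w):
--     counter = 0
--     letter = ""
--     for elem in w:
--         if elem == letter:
--             counter +=1
--             if counter > 1:
--                 return False
--         else:
--             counter = 0
--         letter = elem
--     return True
--
-- def uniGram(allTweets,v):
--     arrayBasque = Counter()
--     arrayCatalan = Counter()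
--     arrayGalician = Counter()
--     arraySpanish = Counter()
--     arrayEnglish = Counter()
--     arrayPortuguese = Counter()
--     sizeBasque = 0
--     sizeCatalan = 0
--     sizeGalician = 0
--     sizeSpanish = 0
--     sizeEnglish = 0
--     sizePortuguese = 0
--     for tweet in allTweets:
--         for word in tweet[0]:
--             skip = False
--             if v == 1:
--                 word = word.lower()
--             elif v == 2:
--                 string = ''.join(letter for letter in word if letter.isalpha())
--                 word = string
--             elif v == 3:
--                 string = ''.join(letter for letter in word if letter.isalpha())
--                 word = string.lower()
--             elif v == 4:
--                 if checkWordObeyRules(word):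
--                     string = ''.join(letter for letter in word if letter.isalpha())
--                     word = string.lower()
--                 else:
--                     skip = True
--             if skip == False:
--                 if (tweet[1] == 'eu'):
--                     arrayBasque[word] += 1
--                     sizeBasque += 1
--                 if (tweet[1] == 'ca'):
--                     arrayCatalan[word] += 1
--                     sizeCatalan += 1
--                 if (tweet[1] == 'gl'):
--                     arrayGalician[word] += 1
--                     sizeGalician += 1
--                 if (tweet[1] == 'es'):
--                     arraySpanish[word] += 1
--                     sizeSpanish += 1
--                 if (tweet[1] == 'en'):
--                     arrayEnglish[word] += 1
--                     sizeEnglish += 1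
--                 if (tweet[1] == 'pt'):
--                     arrayPortuguese[word] += 1
--                     sizePortuguese += 1
--     return (arrayBasque,sizeBasque), (arrayCatalan,sizeCatalan) , (arrayGalician,sizeGalician) , (arraySpanish,sizeSpanish) , (arrayEnglish, sizeEnglish) , (arrayPortuguese,sizePortuguese)
-- ===== SOURCE B (Python) =====
-- from collections import Counter
--
-- def checkWordObeyRules(word):
--     if word[0] != '#' and word[0] != '@' and "http" not in word.lower() and checkNot3Consecutive(word):
--         return True
--     else:
--         return False
--
-- def checkNot3Consecutive(w):
--     counter = 0
--     letter = ""
--     for elem in w: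
--         if elem == letter:
--             counter += 1
--             if counter > 1:
--                 return False
--         else:
--             counter = 0
--         letter = elem
--     return True
--
-- def _processWord(word, v):
--     if v == 1:
--         return word.lower()
--     if v == 2:
--         return ''.join(l for l in word if l.isalpha())
--     if v == 3:
--         return ''.join(l for l in word if l.isalpha()).lower()
--     if v == 4:
--         if checkWordObeyRules(word):
--             return ''.join(l for l in word if l.isalpha()).lower()
--         return None
--     return word
--
-- def uniGram(allTweets, v):
--     def count_lang(lang):
--         c = Counter()
--         for words, code in allTweets:
--             if code == lang:
--                 for word in words:
--                     w = _processWord(word, v)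
--                     if w is not None:
--                         c[w] += 1
--         return (c, sum(c.values()))
--     return tuple(count_lang(l) for l in ('eu', 'ca', 'gl', 'es', 'en', 'pt'))
-- ===== Notes on version B (the rewrite author's own statement) =====
-- stated objective: simpler
-- what changed: Replaces the single pass that threads six parallel Counters and six running size totals through every word with six independent per-language counting passes (a closure run once per language code), each deriving its size afterwards as sum(c.values()); tweets whose code does not match are skipped before their word loop, so the six per-word language tests and the running-total bookkeeping disappear.
import Mathlib
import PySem

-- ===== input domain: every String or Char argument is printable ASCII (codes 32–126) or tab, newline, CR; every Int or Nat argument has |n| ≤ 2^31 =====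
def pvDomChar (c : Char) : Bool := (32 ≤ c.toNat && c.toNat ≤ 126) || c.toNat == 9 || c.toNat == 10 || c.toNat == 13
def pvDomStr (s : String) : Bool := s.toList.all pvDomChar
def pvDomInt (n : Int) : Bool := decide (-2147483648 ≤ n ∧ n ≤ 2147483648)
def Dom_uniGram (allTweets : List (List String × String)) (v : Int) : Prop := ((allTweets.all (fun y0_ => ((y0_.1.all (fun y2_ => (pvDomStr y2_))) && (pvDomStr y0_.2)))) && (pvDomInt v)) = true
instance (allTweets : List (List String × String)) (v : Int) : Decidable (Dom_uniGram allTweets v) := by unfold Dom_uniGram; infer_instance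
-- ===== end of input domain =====

-- B replaces A's single pass threading six parallel counters and six running sizes with six
-- independent per-language counting passes whose sizes are derived afterwards as the sum of
-- counter values (objective: simpler; same asymptotic cost).


-- ===== PORT A =====
-- helper checkNot3Consecutive: loop over the characters with (counter, letter) state;
-- Python's `letter = ""` start never equals a character, ported as `none`.
def checkNot3ConsecutiveGo (counter : Int) (letter : Option Char) : List Char → Bool
  | [] => true
  | c :: rest =>
    if some c = letter then
      if counter + 1 > 1 then false
      else checkNot3ConsecutiveGo (counter + 1) (some c) rest
    else checkNot3ConsecutiveGo 0 (some c) rest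

def checkNot3Consecutive (w : String) : Bool := checkNot3ConsecutiveGo 0 none w.toList

def checkWordObeyRules (word : String) : Bool :=
  match PySem.Str.pyGet? word 0 with
  | none => false   -- Python raises IndexError on word[0] here; such inputs are outside Pre_
  | some c0 =>
    if (c0 != '#') && (c0 != '@') && !(PySem.Str.isIn "http" (PySem.Str.lower word))
        && checkNot3Consecutive word then true else false

-- ''.join(letter for letter in word if letter.isalpha()) : exact, the joined string IS its char list
def filterAlpha (word : String) : String := String.ofList (word.toList.filter PySem.Chars.isalpha)

-- A's inline v-dispatch on each word; `none` = skip (Python's `skip = True`)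
def procWordA (v : Int) (word : String) : Option String :=
  if v = 1 then some (PySem.Str.lower word)
  else if v = 2 then some (filterAlpha word)
  else if v = 3 then some (PySem.Str.lower (filterAlpha word))
  else if v = 4 then
    if checkWordObeyRules word then some (PySem.Str.lower (filterAlpha word)) else none
  else some word

structure StA where
  eu : PySem.Dict String Int × Int
  ca : PySem.Dict String Int × Int
  gl : PySem.Dict String Int × Int
  es : PySem.Dict String Int × Int
  en : PySem.Dict String Int × Int
  pt : PySem.Dict String Int × Int

-- array[word] += 1 ; size += 1
def bumpA (p : PySem.Dict String Int × Int) (w : String) : PySem.Dict String Int × Int :=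
  (p.1.modify w 0 (· + 1), p.2 + 1)

def stepWordA (v : Int) (lang : String) (st : StA) (word : String) : StA :=
  match procWordA v word with
  | none => st
  | some w =>
    let st := if lang == "eu" then { st with eu := bumpA st.eu w } else st
    let st := if lang == "ca" then { st with ca := bumpA st.ca w } else st
    let st := if lang == "gl" then { st with gl := bumpA st.gl w } else st
    let st := if lang == "es" then { st with es := bumpA st.es w } else st
    let st := if lang == "en" then { st with en := bumpA st.en w } else st
    let st := if lang == "pt" then { st with pt := bumpA st.pt w } else st
    st

def uniGram (allTweets : List (List String × String)) (v : Int) : ((List (String × Int)) × Int) × ((List (String × Int)) × Int) × ((List (String × Int)) × Int) × ((List (String × Int)) × Int) × ((List (String × Int)) × Int) × ((List (String × Int)) × Int) :=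
  let st := allTweets.foldl (fun st tweet => tweet.1.foldl (stepWordA v tweet.2) st)
    ⟨(PySem.Dict.empty, 0), (PySem.Dict.empty, 0), (PySem.Dict.empty, 0),
     (PySem.Dict.empty, 0), (PySem.Dict.empty, 0), (PySem.Dict.empty, 0)⟩
  ((st.eu.1.items, st.eu.2), (st.ca.1.items, st.ca.2), (st.gl.1.items, st.gl.2),
   (st.es.1.items, st.es.2), (st.en.1.items, st.en.2), (st.pt.1.items, st.pt.2))

-- ===== PORT B =====
-- Source B's _processWord(word, v)
def procWordB (word : String) (v : Int) : Option String :=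
  if v = 1 then some (PySem.Str.lower word)
  else if v = 2 then some (filterAlpha word)
  else if v = 3 then some (PySem.Str.lower (filterAlpha word))
  else if v = 4 then
    if checkWordObeyRules word then some (PySem.Str.lower (filterAlpha word)) else none
  else some word

-- Source B's count_lang closure: one counting pass over allTweets for one language code
def countLang (allTweets : List (List String × String)) (v : Int) (lang : String) : (List (String × Int)) × Int :=
  let c := allTweets.foldl
    (fun c tweet =>
      if tweet.2 == lang then
        tweet.1.foldl (fun c word =>
          match procWordB word v with
          | none => c
          | some w => c.modify w 0 (· + 1)) c
      else c)
    PySem.Dict.empty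
  (c.items, c.values.sum)

def uniGram_alt (allTweets : List (List String × String)) (v : Int) : ((List (String × Int)) × Int) × ((List (String × Int)) × Int) × ((List (String × Int)) × Int) × ((List (String × Int)) × Int) × ((List (String × Int)) × Int) × ((List (String × Int)) × Int) :=
  (countLang allTweets v "eu", countLang allTweets v "ca", countLang allTweets v "gl",
   countLang allTweets v "es", countLang allTweets v "en", countLang allTweets v "pt")

-- ===== PRECONDITION & SPEC =====
-- Pre_ excludes exactly the inputs on which A raises: with v == 4 an empty word reaches
-- checkWordObeyRules, whose word[0] raises IndexError.
def Pre_uniGram (allTweets : List (List String × String)) (v : Int) : Prop :=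
  v = 4 → ∀ t ∈ allTweets, ∀ w ∈ t.1, w ≠ ""
instance (allTweets : List (List String × String)) (v : Int) : Decidable (Pre_uniGram allTweets v) := by unfold Pre_uniGram; infer_instance
def pvWitness_uniGram : (List (List String × String)) × Int := ([(["ab", "cd"], "eu"), (["zz"], "en")], 4)

def Spec_uniGram (allTweets : List (List String × String)) (v : Int) (out : ((List (String × Int)) × Int) × ((List (String × Int)) × Int) × ((List (String × Int)) × Int) × ((List (String × Int)) × Int) × ((List (String × Int)) × Int) × ((List (String × Int)) × Int)) : Prop := out = uniGram_alt allTweets v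
instance (allTweets : List (List String × String)) (v : Int) (out : ((List (String × Int)) × Int) × ((List (String × Int)) × Int) × ((List (String × Int)) × Int) × ((List (String × Int)) × Int) × ((List (String × Int)) × Int) × ((List (String × Int)) × Int)) : Decidable (Spec_uniGram allTweets v out) := by
  unfold Spec_uniGram
  haveI h1 : DecidableEq ((List (String × Int)) × Int) := inferInstance
  infer_instance

-- ===== CLAIM (what is proved, stated in full; the proofs are below) =====
def Claim_equal_uniGram : Prop := ∀ (allTweets : List (List String × String)) (v : Int), Dom_uniGram allTweets v → Pre_uniGram allTweets v → Spec_uniGram allTweets v (uniGram allTweets v)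

-- ===== LEMMAS AND PROOFS =====

-- the two word-normalisation helpers compute the same option (same chain, argument order swapped)
lemma proc_eq (v : Int) (w : String) : procWordB w v = procWordA v w := rfl

-- per-word step of one (counter, size) component of A, and B's pure counter step
def pstep (v : Int) (p : PySem.Dict String Int × Int) (word : String) : PySem.Dict String Int × Int :=
  match procWordA v word with
  | none => p
  | some w => bumpA p w

def dstep (v : Int) (c : PySem.Dict String Int) (word : String) : PySem.Dict String Int :=
  match procWordB word v with
  | none => c
  | some w => c.modify w 0 (· + 1)

def condStep (v : Int) (lang L : String) (p : PySem.Dict String Int × Int) (word : String) : PySem.Dict String Int × Int :=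
  match procWordA v word with
  | none => p
  | some w => if lang == L then bumpA p w else p

lemma stepWordA_eq (v : Int) (lang : String) (st : StA) (word : String) :
    stepWordA v lang st word =
      ⟨condStep v lang "eu" st.eu word, condStep v lang "ca" st.ca word,
       condStep v lang "gl" st.gl word, condStep v lang "es" st.es word,
       condStep v lang "en" st.en word, condStep v lang "pt" st.pt word⟩ := by
  unfold stepWordA condStep
  cases procWordA v word with
  | none => rfl
  | some w => split_ifs <;> rfl

lemma foldWords_eq (v : Int) (lang : String) (ws : List String) :
    ∀ st : StA, ws.foldl (stepWordA v lang) st =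
      ⟨ws.foldl (condStep v lang "eu") st.eu, ws.foldl (condStep v lang "ca") st.ca,
       ws.foldl (condStep v lang "gl") st.gl, ws.foldl (condStep v lang "es") st.es,
       ws.foldl (condStep v lang "en") st.en, ws.foldl (condStep v lang "pt") st.pt⟩ := by
  induction ws with
  | nil => intro st; rfl
  | cons w ws ih => intro st; simp only [List.foldl_cons, stepWordA_eq, ih]

lemma condFold_eq (v : Int) (lang L : String) (ws : List String) (p : PySem.Dict String Int × Int) :
    ws.foldl (condStep v lang L) p = if lang == L then ws.foldl (pstep v) p else p := by
  cases h : lang == L with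
  | true =>
    have hf : condStep v lang L = pstep v := by
      funext q u; unfold condStep pstep; cases procWordA v u <;> simp [h]
    rw [hf]
    simp
  | false =>
    have hf : ∀ q u, condStep v lang L q u = q := by
      intro q u; unfold condStep; cases procWordA v u <;> simp [h]
    have hfix : ∀ (ws : List String) q, ws.foldl (condStep v lang L) q = q := by
      intro ws
      induction ws with
      | nil => intro q; rfl
      | cons u ws ih => intro q; rw [List.foldl_cons, hf, ih]
    rw [hfix]
    simp

lemma tweetFold_eq (v : Int) (ts : List (List String × String)) :
    ∀ st : StA, ts.foldl (fun st t => t.1.foldl (stepWordA v t.2) st) st =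
      ⟨ts.foldl (fun p t => if t.2 == "eu" then t.1.foldl (pstep v) p else p) st.eu,
       ts.foldl (fun p t => if t.2 == "ca" then t.1.foldl (pstep v) p else p) st.ca,
       ts.foldl (fun p t => if t.2 == "gl" then t.1.foldl (pstep v) p else p) st.gl,
       ts.foldl (fun p t => if t.2 == "es" then t.1.foldl (pstep v) p else p) st.es,
       ts.foldl (fun p t => if t.2 == "en" then t.1.foldl (pstep v) p else p) st.en,
       ts.foldl (fun p t => if t.2 == "pt" then t.1.foldl (pstep v) p else p) st.pt⟩ := by
  induction ts with
  | nil => intro st; rfl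
  | cons t ts ih =>
    intro st
    rw [List.foldl_cons, ih, foldWords_eq]
    simp only [List.foldl_cons, condFold_eq]

-- a pointwise +1 at one key of a nodup key list adds one to the sum
lemma sum_map_ite (l : List String) (f : String → Int) (w : String) (h : l.Nodup) (hw : w ∈ l) :
    (l.map (fun k => if k = w then f w + 1 else f k)).sum = (l.map f).sum + 1 := by
  induction l with
  | nil => simp at hw
  | cons a l ih =>
    rcases List.mem_cons.1 hw with rfl | hw'
    · have hnot : w ∉ l := (List.nodup_cons.1 h).1
      rw [List.map_cons, if_pos rfl, List.sum_cons, List.map_cons, List.sum_cons,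
        List.map_congr_left (fun k hk => if_neg (by rintro rfl; exact hnot hk))]
      ring
    · have ha : a ≠ w := by rintro rfl; exact (List.nodup_cons.1 h).1 hw'
      rw [List.map_cons, if_neg ha, List.sum_cons, List.map_cons, List.sum_cons,
        ih (List.nodup_cons.1 h).2 hw']
      ring

lemma bump_nodup (d : PySem.Dict String Int) (w : String) (h : d.keys.Nodup) :
    (d.modify w 0 (· + 1)).keys.Nodup := by
  rw [PySem.Dict.keys_modify]
  exact PySem.Dict.nodup_keys_insert d w _ h

-- each counter increment adds exactly one to the sum of the counter's values
lemma bump_sum (d : PySem.Dict String Int) (w : String) (h : d.keys.Nodup) :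
    (d.modify w 0 (· + 1)).values.sum = d.values.sum + 1 := by
  cases hc : d.contains w with
  | true =>
    have hmem : w ∈ d.keys := (PySem.Dict.contains_iff_mem_keys d w).1 hc
    have hnd' : (d.modify w 0 (· + 1)).keys.Nodup := bump_nodup d w h
    have hkeys : (d.modify w 0 (· + 1)).keys = d.keys := by
      rw [PySem.Dict.keys_modify]
      exact PySem.Dict.keys_insert_of_contains d _ hc
    rw [PySem.Dict.values_eq_map_keys _ hnd' 0, PySem.Dict.values_eq_map_keys d h 0, hkeys]
    have hfun : ∀ k ∈ d.keys, (d.modify w 0 (· + 1)).getD k 0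
        = (fun k => if k = w then d.getD w 0 + 1 else d.getD k 0) k := by
      intro k _
      show (d.modify w 0 (· + 1)).getD k 0 = if k = w then d.getD w 0 + 1 else d.getD k 0
      by_cases hkw : k = w
      · subst hkw; rw [if_pos rfl]; exact PySem.Dict.getD_modify_self d k 0 _
      · rw [if_neg hkw]; exact PySem.Dict.getD_modify_of_ne d 0 _ hkw
    rw [List.map_congr_left hfun]
    exact sum_map_ite d.keys (fun k => d.getD k 0) w h hmem
  | false =>
    have hitems : (d.modify w 0 (· + 1)).items = d.items ++ [(w, d.getD w 0 + 1)] :=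
      PySem.Dict.items_insert_of_not_contains d _ hc
    rw [PySem.Dict.getD_of_not_contains d 0 hc] at hitems
    simp only [PySem.Dict.values, hitems, List.map_append, List.sum_append]
    simp

def SizeInv (p : PySem.Dict String Int × Int) : Prop := p.1.keys.Nodup ∧ p.2 = p.1.values.sum

lemma wordFold_inv (v : Int) (ws : List String) :
    ∀ p : PySem.Dict String Int × Int, SizeInv p →
      (ws.foldl (pstep v) p).1 = ws.foldl (dstep v) p.1 ∧ SizeInv (ws.foldl (pstep v) p) := by
  induction ws with
  | nil => intro p hp; exact ⟨rfl, hp⟩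
  | cons w ws ih =>
    intro p hp
    simp only [List.foldl_cons]
    have hstep : (pstep v p w).1 = dstep v p.1 w ∧ SizeInv (pstep v p w) := by
      unfold pstep dstep
      rw [proc_eq]
      cases procWordA v w with
      | none => exact ⟨rfl, hp⟩
      | some x =>
        refine ⟨rfl, bump_nodup p.1 x hp.1, ?_⟩
        show p.2 + 1 = (p.1.modify x 0 (· + 1)).values.sum
        rw [bump_sum p.1 x hp.1, hp.2]
    have hrec := ih _ hstep.2
    rw [hstep.1] at hrec
    exact hrec

lemma tweetFold_inv (v : Int) (L : String) (ts : List (List String × String)) :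
    ∀ p : PySem.Dict String Int × Int, SizeInv p →
      (ts.foldl (fun p t => if t.2 == L then t.1.foldl (pstep v) p else p) p).1
        = ts.foldl (fun c t => if t.2 == L then t.1.foldl (dstep v) c else c) p.1 ∧
      SizeInv (ts.foldl (fun p t => if t.2 == L then t.1.foldl (pstep v) p else p) p) := by
  induction ts with
  | nil => intro p hp; exact ⟨rfl, hp⟩
  | cons t ts ih =>
    intro p hp
    simp only [List.foldl_cons]
    cases h : t.2 == L with
    | true =>
      obtain ⟨h1, h2⟩ := wordFold_inv v t.1 p hp
      rw [← h1]
      exact ih _ h2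
    | false =>
      simp only [if_neg Bool.false_ne_true]
      exact ih p hp

lemma component_eq (allTweets : List (List String × String)) (v : Int) (L : String) :
    ((allTweets.foldl (fun p t => if t.2 == L then t.1.foldl (pstep v) p else p) (PySem.Dict.empty, 0)).1.items,
     (allTweets.foldl (fun p t => if t.2 == L then t.1.foldl (pstep v) p else p) (PySem.Dict.empty, 0)).2)
    = countLang allTweets v L := by
  obtain ⟨h1, _, hsum⟩ :=
    tweetFold_inv v L allTweets (PySem.Dict.empty, 0) ⟨PySem.Dict.nodup_keys_empty, rfl⟩
  simp only [countLang]
  rw [hsum, h1]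
  rfl

-- ===== VERDICT (by name: the statement is the Claim_ definition above) =====
theorem uniGram_spec : Claim_equal_uniGram := by
  intro allTweets v _ _
  show uniGram allTweets v = uniGram_alt allTweets v
  simp only [uniGram, uniGram_alt, tweetFold_eq]
  exact congrArg₂ Prod.mk (component_eq allTweets v "eu")
    (congrArg₂ Prod.mk (component_eq allTweets v "ca")
      (congrArg₂ Prod.mk (component_eq allTweets v "gl")
        (congrArg₂ Prod.mk (component_eq allTweets v "es")
          (congrArg₂ Prod.mk (component_eq allTweets v "en")
            (component_eq allTweets v "pt")))))
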